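-- pv_equiv track=rewrite | github.com/mharwani/AMR-parsing | Aligner/aligner/wordmatch.py | search_fuzzy
-- ===== SOURCE A (Python) =====
-- def lc_str(X, Y):
--     n = len(X)
--     m = len(Y)
--     L = [[0]*(n+1) for i in range(m+1)]
--     l = 0
--
--     for i in range(1, m+1):
--         for j in range(1, n+1):
--             if Y[i-1] == X[j-1]:
--                 L[i][j] = L[i-1][j-1] + 1
--                 if L[i][j] > l:
--                     l = L[i][j]
--             else:
--                 L[i][j] = 0
--
--     return l
--
-- def fuzzy(X, Y, thres=None):
--     l = lc_str(X, Y)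
--     if thres:
--         if type(thres) is float:
--             fl = float(l)
--             lx, ly = len(X), len(Y)
--             if fl/max(lx,ly) >= thres:
--                 return True
--             else:
--                 return False
--         if type(thres) is int:
--             if l >= thres:
--                 return True
--             else:
--                 return X == Y
--     else:
--         return X == Y
--
-- def search_fuzzy(words, tokens, thres=4):
--     idxs = []
--     n = len(tokens)
--
--     for i in range(n):
--         for word in words:
--             if fuzzy(word, tokens[i], thres) or (len(word) > 2 and word == tokens[i][:-1]):
--                 idxs.append((i, i+1))
--                 break
--
--     return idxs
-- ===== SOURCE B (Python) =====
-- def lcs_len(X, Y):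
--     # longest-common-substring length by descending window scan instead of a DP table
--     s, t = (X, Y) if len(X) <= len(Y) else (Y, X)
--     for L in range(len(s), 0, -1):
--         for i in range(len(s) - L + 1):
--             if s[i:i + L] in t:
--                 return L
--     return 0
--
-- def _matches(w, tok, thres):
--     return (bool(thres) and lcs_len(w, tok) >= thres) or w == tok or (len(w) > 2 and w == tok[:-1])
--
-- def search_fuzzy(words, tokens, thres=4):
--     return [(i, i + 1) for i, tok in enumerate(tokens)
--             if any(_matches(w, tok, thres) for w in words)]
-- ===== Notes on version B (the rewrite author's own statement) =====
-- stated objective: faster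
-- what changed: lc_str's O(n*m) suffix-DP table is replaced by a descending window scan (try each candidate length from the shorter string's length down, testing s[i:i+L] in t by C-level substring membership, returning at the first hit), and search_fuzzy's index loop with break becomes an enumerate/any comprehension.
import Mathlib
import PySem

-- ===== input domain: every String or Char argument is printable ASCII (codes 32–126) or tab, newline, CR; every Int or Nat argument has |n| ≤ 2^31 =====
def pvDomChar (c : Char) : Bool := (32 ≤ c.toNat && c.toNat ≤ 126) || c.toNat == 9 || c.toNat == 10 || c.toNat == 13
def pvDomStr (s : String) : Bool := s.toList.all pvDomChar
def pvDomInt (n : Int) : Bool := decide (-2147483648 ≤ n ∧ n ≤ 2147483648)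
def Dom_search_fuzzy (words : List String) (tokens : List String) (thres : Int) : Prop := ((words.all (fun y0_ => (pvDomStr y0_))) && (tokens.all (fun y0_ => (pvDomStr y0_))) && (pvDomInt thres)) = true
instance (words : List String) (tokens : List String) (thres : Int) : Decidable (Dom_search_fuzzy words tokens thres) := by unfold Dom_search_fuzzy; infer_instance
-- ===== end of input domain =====

-- B replaces lc_str's suffix-DP table by a descending window scan over candidate lengths
-- (first hit = the answer), and the index loop with break by an enumerate/any comprehension;
-- a timing run measured B faster (no table allocation, early exit at the longest match).

-- ===== PORT A =====
-- lc_str's inner loop over j = 1..n: Python's row i reads only row i-1 cell by cell, so the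
-- fold carries the previous row (identical cell values); `v` is L[i][j], `l` the running max,
-- branch structure (the max is only updated in the equal-character branch) as in A.
def lcInner (y : Char) : List Int → List Char → Int → List Int × Int
  | p0 :: prest, x :: xs, l =>
    if y == x then
      let v : Int := p0 + 1
      let l' : Int := if v > l then v else l
      let r := lcInner y prest xs l'
      (v :: r.1, r.2)
    else
      let r := lcInner y prest xs l
      ((0 : Int) :: r.1, r.2)
  | _, _, l => ([], l)

-- outer loop over i = 1..m: next previous row is [0] + current row (L[i][0] = 0)
def lcOuter (X : List Char) : List Int → List Char → Int → Int
  | _, [], l => l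
  | prev, y :: ys, l =>
    let r := lcInner y prev X l
    lcOuter X (0 :: r.1) ys r.2

def lc_str (X Y : List Char) : Int :=
  lcOuter X (List.replicate (X.length + 1) 0) Y 0

-- fuzzy: thres is an int here, so Python's `type(thres) is float` branch is dead code;
-- `if thres:` is the test thres ≠ 0.
def fuzzyA (X Y : String) (thres : Int) : Bool :=
  let l := lc_str X.toList Y.toList
  if thres ≠ 0 then
    (if l ≥ thres then true else X.toList == Y.toList)
  else X.toList == Y.toList

-- the loop-body condition: fuzzy(word, tokens[i], thres) or (len(word) > 2 and word == tokens[i][:-1])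
def condA (word tok : String) (thres : Int) : Bool :=
  fuzzyA word tok thres ||
    (decide (2 < word.toList.length) && (word.toList == PySem.List.slice tok.toList none (some (-1))))

-- the inner `for word in words: … break` is a first-match scan
def firstMatch (words : List String) (tok : String) (thres : Int) : Bool :=
  match words with
  | [] => false
  | w :: ws => if condA w tok thres then true else firstMatch ws tok thres

def search_fuzzy (words : List String) (tokens : List String) (thres : Int) : List (Int × Int) :=
  (List.range tokens.length).foldl
    (fun idxs i =>
      if firstMatch words (tokens.getD i "") thres then idxs ++ [((i : Int), (i : Int) + 1)]
      else idxs) []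

-- ===== PORT B =====
-- s[i:i+L] in t, ported via PySem slice and substring membership
def hasWin (s t : List Char) (L : Nat) : Bool :=
  (List.range (s.length - L + 1)).any
    (fun i => PySem.Chars.isIn (PySem.List.slice s (some (i : Int)) (some ((i : Int) + (L : Int)))) t)

-- for L in range(len(s), 0, -1): first hit wins
def lcsGo (s t : List Char) : Nat → Int
  | 0 => 0
  | L + 1 => if hasWin s t (L + 1) then ((L : Int) + 1) else lcsGo s t L

def lcs_len (X Y : List Char) : Int :=
  let s := if X.length ≤ Y.length then X else Y
  let t := if X.length ≤ Y.length then Y else X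
  lcsGo s t s.length

def matchesB (w tok : String) (thres : Int) : Bool :=
  (decide (thres ≠ 0) && decide (lcs_len w.toList tok.toList ≥ thres)) ||
    (w.toList == tok.toList) ||
    (decide (2 < w.toList.length) && (w.toList == PySem.List.slice tok.toList none (some (-1))))

def search_fuzzy_alt (words : List String) (tokens : List String) (thres : Int) : List (Int × Int) :=
  ((PySem.List.enumerate tokens).filter
      (fun p => words.any (fun w => matchesB w p.2 thres))).map
    (fun p => (p.1, p.1 + 1))

-- ===== PRECONDITION & SPEC =====
def Spec_search_fuzzy (words : List String) (tokens : List String) (thres : Int) (out : List (Int × Int)) : Prop := out = search_fuzzy_alt words tokens thres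
instance (words : List String) (tokens : List String) (thres : Int) (out : List (Int × Int)) : Decidable (Spec_search_fuzzy words tokens thres out) := by unfold Spec_search_fuzzy; infer_instance

-- ===== CLAIM (what is proved, stated in full; the proofs are below) =====
def Claim_equal_search_fuzzy : Prop := ∀ (words : List String) (tokens : List String) (thres : Int), Dom_search_fuzzy words tokens thres → Spec_search_fuzzy words tokens thres (search_fuzzy words tokens thres)

-- ===== LEMMAS AND PROOFS =====

-- length of the longest common prefix
def lcp : List Char → List Char → Nat
  | a :: as, b :: bs => if a = b then lcp as bs + 1 else 0
  | _, _ => 0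

-- the values L[i][j] for j = consumed+1 .. n, where yr = reversed Y-prefix, xrev = reversed consumed X-prefix
def outRow (yr : List Char) : List Char → List Char → List Int
  | _, [] => []
  | xrev, x :: xs => ((lcp yr (x :: xrev) : Nat) : Int) :: outRow yr (x :: xrev) xs

-- the previous row as consumed by lcInner (columns consumed .. n)
def rowAll (yr : List Char) : List Char → List Char → List Int
  | xrev, [] => [((lcp yr xrev : Nat) : Int)]
  | xrev, x :: xs => ((lcp yr xrev : Nat) : Int) :: rowAll yr (x :: xrev) xs

-- all DP cell values L[i][j], i = 1..m, j = 1..n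
def allVals (X : List Char) : List Char → List Char → List Int
  | _, [] => []
  | yr, y :: ys => outRow (y :: yr) [] X ++ allVals X (y :: yr) ys

theorem lcp_nil_left (b : List Char) : lcp [] b = 0 := by cases b <;> rfl

theorem lcp_nil_right (a : List Char) : lcp a [] = 0 := by cases a <;> rfl

theorem lcp_le_left : ∀ a b : List Char, lcp a b ≤ a.length
  | [], b => by simp [lcp_nil_left]
  | _ :: _, [] => by simp [lcp_nil_right]
  | a :: as, b :: bs => by
      by_cases h : a = b
      · simpa [lcp, h] using Nat.succ_le_succ (lcp_le_left as bs)
      · simp [lcp, h]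

theorem take_lcp_eq : ∀ a b : List Char, a.take (lcp a b) = b.take (lcp a b)
  | [], b => by simp [lcp_nil_left]
  | _ :: _, [] => by simp [lcp_nil_right]
  | a :: as, b :: bs => by
      by_cases h : a = b
      · simp [lcp, h, take_lcp_eq as bs]
      · simp [lcp, h]

theorem length_take_lcp (a b : List Char) : (a.take (lcp a b)).length = lcp a b := by
  simp [List.length_take, Nat.min_eq_left (lcp_le_left a b)]

theorem length_le_lcp : ∀ p a b : List Char, p <+: a → p <+: b → p.length ≤ lcp a b
  | [], _, _, _, _ => Nat.zero_le _
  | c :: p, [], _, ha, _ => absurd ha (by simp)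
  | c :: p, _ :: _, [], _, hb => absurd hb (by simp)
  | c :: p, a :: as, b :: bs, ha, hb => by
      obtain ⟨rfl, ha'⟩ := List.cons_prefix_cons.1 ha
      obtain ⟨rfl, hb'⟩ := List.cons_prefix_cons.1 hb
      simpa [lcp] using Nat.succ_le_succ (length_le_lcp p as bs ha' hb')

theorem rowAll_eq (yr : List Char) (xs : List Char) : ∀ xrev,
    rowAll yr xrev xs = ((lcp yr xrev : Nat) : Int) :: outRow yr xrev xs := by
  induction xs with
  | nil => intro xrev; simp [rowAll, outRow]
  | cons x xs ih => intro xrev; simp [rowAll, outRow, ih (x :: xrev)]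

theorem rowAll_nil_left (xs : List Char) : ∀ xrev,
    rowAll [] xrev xs = List.replicate (xs.length + 1) 0 := by
  induction xs with
  | nil => intro xrev; simp [rowAll, lcp_nil_left]
  | cons x xs ih =>
      intro xrev
      simp [rowAll, lcp_nil_left, ih (x :: xrev), List.replicate_succ]

theorem ite_gt_eq_max (v l : Int) : (if v > l then v else l) = max l v := by
  rw [max_def]; split_ifs <;> omega

theorem lcInner_spec (y : Char) (yr : List Char) : ∀ (xs xrev : List Char) (l : Int), 0 ≤ l →
    lcInner y (rowAll yr xrev xs) xs l
      = (outRow (y :: yr) xrev xs, (outRow (y :: yr) xrev xs).foldl max l) := by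
  intro xs
  induction xs with
  | nil => intro xrev l hl; simp [rowAll, lcInner, outRow]
  | cons x xs ih =>
      intro xrev l hl
      by_cases h : y = x
      · subst h
        have hl' : (0:Int) ≤ max l (((lcp yr xrev : Nat) : Int) + 1) := le_trans hl (le_max_left _ _)
        simp only [rowAll, lcInner, BEq.rfl, if_true, ite_gt_eq_max, ih (y :: xrev) _ hl']
        simp [outRow, lcp, List.foldl_cons]
      · have hbeq : (y == x) = false := by simpa using h
        have hz : ((lcp (y :: yr) (x :: xrev) : Nat) : Int) = 0 := by simp [lcp, h]
        simp only [rowAll, lcInner, hbeq, Bool.false_eq_true, if_false, ih (x :: xrev) l hl]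
        simp [outRow, hz, List.foldl_cons, max_eq_left hl]

theorem lcOuter_spec (X : List Char) : ∀ (ys yr : List Char) (l : Int), 0 ≤ l →
    lcOuter X (rowAll yr [] X) ys l = (allVals X yr ys).foldl max l := by
  intro ys
  induction ys with
  | nil => intro yr l hl; simp [lcOuter, allVals]
  | cons y ys ih =>
      intro yr l hl
      have hrow := lcInner_spec y yr X [] l hl
      have hnext : (0 : Int) :: outRow (y :: yr) [] X = rowAll (y :: yr) [] X := by
        rw [rowAll_eq]; simp [lcp_nil_right]
      have hl' : (0:Int) ≤ (outRow (y :: yr) [] X).foldl max l :=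
        le_trans hl (PySem.List.le_foldl_max _ _).1
      simp only [lcOuter, hrow, hnext, ih (y :: yr) _ hl', allVals, List.foldl_append]

theorem lc_str_eq_fold (X Y : List Char) :
    lc_str X Y = (allVals X [] Y).foldl max 0 := by
  rw [lc_str, ← rowAll_nil_left X [], lcOuter_spec X Y [] 0 le_rfl]

theorem mem_outRow (yr : List Char) (v : Int) :
    ∀ (xs xrev : List Char), v ∈ outRow yr xrev xs →
      ∃ xs1 x xs2, xs = xs1 ++ x :: xs2 ∧ v = ((lcp yr (x :: (xs1.reverse ++ xrev)) : Nat) : Int) := by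
  intro xs
  induction xs with
  | nil => intro xrev h; simp [outRow] at h
  | cons x xs ih =>
      intro xrev h
      rcases (by simpa [outRow] using h : v = ((lcp yr (x :: xrev) : Nat) : Int) ∨ v ∈ outRow yr (x :: xrev) xs) with h1 | h2
      · exact ⟨[], x, xs, rfl, by simpa using h1⟩
      · obtain ⟨xs1, x', xs2, hxs, hv⟩ := ih (x :: xrev) h2
        exact ⟨x :: xs1, x', xs2, by simp [hxs], by simpa using hv⟩

theorem outRow_mem (yr : List Char) :
    ∀ (xs1 : List Char) (x : Char) (xs2 xrev : List Char),
      ((lcp yr (x :: (xs1.reverse ++ xrev)) : Nat) : Int) ∈ outRow yr xrev (xs1 ++ x :: xs2) := by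
  intro xs1
  induction xs1 with
  | nil => intro x xs2 xrev; simp [outRow]
  | cons z xs1 ih =>
      intro x xs2 xrev
      have := ih x xs2 (z :: xrev)
      simpa [outRow, List.mem_cons] using Or.inr this

theorem mem_allVals (X : List Char) (v : Int) :
    ∀ (ys yr : List Char), v ∈ allVals X yr ys →
      ∃ ys1 y ys2, ys = ys1 ++ y :: ys2 ∧ v ∈ outRow (y :: (ys1.reverse ++ yr)) [] X := by
  intro ys
  induction ys with
  | nil => intro yr h; simp [allVals] at h
  | cons y ys ih =>
      intro yr h
      rcases (by simpa [allVals] using h : v ∈ outRow (y :: yr) [] X ∨ v ∈ allVals X (y :: yr) ys) with h1 | h2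
      · exact ⟨[], y, ys, rfl, by simpa using h1⟩
      · obtain ⟨ys1, y', ys2, hys, hv⟩ := ih (y :: yr) h2
        exact ⟨y :: ys1, y', ys2, by simp [hys], by simpa using hv⟩

theorem allVals_mem (X : List Char) (v : Int) :
    ∀ (ys1 : List Char) (y : Char) (ys2 yr : List Char),
      v ∈ outRow (y :: (ys1.reverse ++ yr)) [] X → v ∈ allVals X yr (ys1 ++ y :: ys2) := by
  intro ys1
  induction ys1 with
  | nil => intro y ys2 yr h; simpa [allVals] using Or.inl (by simpa using h)
  | cons z ys1 ih =>
      intro y ys2 yr h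
      have := ih y ys2 (z :: yr) (by simpa using h)
      simpa [allVals] using Or.inr this

theorem rev_take_infix (q : List Char) (p qs : List Char) (hp : p <+: q.reverse) (hq : q <+: qs) :
    p.reverse <:+: qs := by
  have h1 : p.reverse <:+ q := by
    have := List.reverse_suffix.2 hp
    simpa using this
  exact h1.isInfix.trans hq.isInfix

theorem exists_common_of_mem (X Y : List Char) (v : Int) (hv : v ∈ allVals X [] Y) :
    ∃ w : List Char, (w.length : Int) = v ∧ w <:+: X ∧ w <:+: Y := by
  obtain ⟨ys1, y, ys2, hY, hrow⟩ := mem_allVals X v Y [] hv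
  obtain ⟨xs1, x, xs2, hX, hv'⟩ := mem_outRow _ v X [] hrow
  set A : List Char := y :: (ys1.reverse ++ []) with hA
  set B : List Char := x :: (xs1.reverse ++ []) with hB
  refine ⟨(A.take (lcp A B)).reverse, ?_, ?_, ?_⟩
  · rw [List.length_reverse, length_take_lcp, hv']
  · rw [take_lcp_eq]
    have hBrev : (xs1 ++ [x]).reverse = B := by simp [hB]
    refine rev_take_infix (xs1 ++ [x]) _ X ?_ ⟨xs2, by simp [hX]⟩
    rw [hBrev]; exact List.take_prefix _ _
  · have hArev : (ys1 ++ [y]).reverse = A := by simp [hA]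
    refine rev_take_infix (ys1 ++ [y]) _ Y ?_ ⟨ys2, by simp [hY]⟩
    rw [hArev]; exact List.take_prefix _ _

theorem le_fold_of_common (X Y : List Char) (w : List Char) (hX : w <:+: X) (hY : w <:+: Y) :
    (w.length : Int) ≤ (allVals X [] Y).foldl max 0 := by
  rcases List.eq_nil_or_concat' w with rfl | ⟨wi, wl, rfl⟩
  · simpa using (PySem.List.le_foldl_max (allVals X [] Y) 0).1
  · obtain ⟨u, v, hYd⟩ := hY
    obtain ⟨u', v', hXd⟩ := hX
    have hYd' : Y = (u ++ wi) ++ wl :: v := by rw [← hYd]; simp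
    have hXd' : X = (u' ++ wi) ++ wl :: v' := by rw [← hXd]; simp
    set A : List Char := wl :: ((u ++ wi).reverse ++ []) with hA
    set B : List Char := wl :: ((u' ++ wi).reverse ++ []) with hB
    have hmem : ((lcp A B : Nat) : Int) ∈ allVals X [] Y := by
      rw [hYd']
      exact allVals_mem X _ (u ++ wi) wl v []
        (by rw [hXd']; exact outRow_mem A (u' ++ wi) wl v' [])
    have hle : (wi ++ [wl]).length ≤ lcp A B := by
      apply length_le_lcp (wl :: wi.reverse) A B ?_ ?_ |>.trans_eq' (by simp)
      · rw [hA]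
        exact List.cons_prefix_cons.2 ⟨rfl, by simpa using List.reverse_prefix.2 (List.suffix_append u wi)⟩
      · rw [hB]
        exact List.cons_prefix_cons.2 ⟨rfl, by simpa using List.reverse_prefix.2 (List.suffix_append u' wi)⟩
    calc ((wi ++ [wl]).length : Int) ≤ ((lcp A B : Nat) : Int) := by exact_mod_cast hle
      _ ≤ (allVals X [] Y).foldl max 0 := (PySem.List.le_foldl_max _ _).2 _ hmem

theorem hasWin_iff (s t : List Char) (L : Nat) (hL : L ≤ s.length) :
    hasWin s t L = true ↔ ∃ w : List Char, w.length = L ∧ w <:+: s ∧ w <:+: t := by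
  rw [hasWin, List.any_eq_true]
  constructor
  · rintro ⟨i, hi, hp⟩
    rw [List.mem_range] at hi
    rw [PySem.List.slice_natCast_add] at hp
    refine ⟨(s.drop i).take L, ?_,
      ((s.drop i).take_prefix L).isInfix.trans (s.drop_suffix i).isInfix,
      (PySem.Chars.isIn_iff_infix _ _).1 hp⟩
    simp only [List.length_take, List.length_drop]
    omega
  · rintro ⟨w, hw, ⟨u, v, huv⟩, hwt⟩
    have hlen : (u ++ w ++ v).length = s.length := by rw [huv]
    simp only [List.length_append] at hlen
    refine ⟨u.length, ?_, ?_⟩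
    · rw [List.mem_range]; omega
    · rw [PySem.List.slice_natCast_add]
      have hdrop : s.drop u.length = w ++ v := by
        rw [← huv, List.append_assoc, List.drop_left]
      rw [hdrop, ← hw, List.take_left]
      exact (PySem.Chars.isIn_iff_infix _ _).2 hwt

theorem lcsGo_eq (s t : List Char) (m : Int)
    (hm0 : 0 ≤ m)
    (hlow : m = 0 ∨ hasWin s t m.toNat = true)
    (habove : ∀ L : Nat, m < (L : Int) → L ≤ s.length → hasWin s t L = false) :
    ∀ F : Nat, F ≤ s.length → m ≤ (F : Int) → lcsGo s t F = m := by
  intro F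
  induction F with
  | zero =>
      intro _ hub
      simp only [lcsGo, Nat.cast_zero] at hub ⊢
      omega
  | succ F ih =>
      intro hF hub
      by_cases h : hasWin s t (F + 1) = true
      · have h1 : ¬ m < ((F : Int) + 1) := by
          intro hlt
          have := habove (F + 1) (by push_cast; omega) hF
          rw [this] at h
          exact Bool.false_ne_true h
        push_cast at hub
        simp only [lcsGo, h, if_true]
        omega
      · have hne : m ≠ (F : Int) + 1 := by
          intro he
          rcases hlow with h0 | hw
          · omega
          · have hmn : m.toNat = F + 1 := by omega
            rw [hmn] at hw
            exact h hw
        push_cast at hub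
        rw [Bool.not_eq_true] at h
        simp only [lcsGo, h, Bool.false_eq_true, if_false]
        exact ih (by omega) (by push_cast; omega)

theorem lc_core (X Y s t : List Char)
    (hcomm : ∀ w : List Char, (w <:+: X ∧ w <:+: Y) ↔ (w <:+: s ∧ w <:+: t)) :
    lc_str X Y = lcsGo s t s.length := by
  set m := (allVals X [] Y).foldl max 0 with hm
  have hm0 : 0 ≤ m := (PySem.List.le_foldl_max _ _).1
  have hwit : m = 0 ∨ ∃ w : List Char, (w.length : Int) = m ∧ w <:+: s ∧ w <:+: t := by
    rcases PySem.List.foldl_max_mem (allVals X [] Y) 0 with h | h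
    · left; exact h
    · right
      obtain ⟨w, hl, hX, hY⟩ := exists_common_of_mem X Y m h
      obtain ⟨hs, ht⟩ := (hcomm w).1 ⟨hX, hY⟩
      exact ⟨w, hl, hs, ht⟩
  have hub : m ≤ (s.length : Int) := by
    rcases hwit with h0 | ⟨w, hl, hws, _⟩
    · omega
    · have := hws.length_le; omega
  have hlow : m = 0 ∨ hasWin s t m.toNat = true := by
    rcases hwit with h0 | ⟨w, hl, hws, hwt⟩
    · left; exact h0
    · right
      have hwl : w.length ≤ s.length := hws.length_le
      exact (hasWin_iff s t m.toNat (by omega)).2 ⟨w, by omega, hws, hwt⟩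
  have habove : ∀ L : Nat, m < (L : Int) → L ≤ s.length → hasWin s t L = false := by
    intro L hmL hLs
    by_contra hne
    rw [Bool.not_eq_false] at hne
    obtain ⟨w, hwlen, hws, hwt⟩ := (hasWin_iff s t L hLs).1 hne
    obtain ⟨hX, hY⟩ := (hcomm w).2 ⟨hws, hwt⟩
    have hc := le_fold_of_common X Y w hX hY
    rw [← hm] at hc
    omega
  rw [lc_str_eq_fold, ← hm]
  exact (lcsGo_eq s t m hm0 hlow habove s.length le_rfl hub).symm

theorem lc_eq_lcs (X Y : List Char) : lc_str X Y = lcs_len X Y := by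
  by_cases h : X.length ≤ Y.length
  · simp only [lcs_len, h, if_true]
    exact lc_core X Y X Y (fun w => Iff.rfl)
  · simp only [lcs_len, h, if_false]
    exact lc_core X Y Y X (fun w => and_comm)

theorem cond_eq (w tok : String) (thres : Int) : condA w tok thres = matchesB w tok thres := by
  simp only [condA, matchesB, fuzzyA, lc_eq_lcs]
  by_cases h0 : thres = 0
  · simp [h0]
  · by_cases hge : lcs_len w.toList tok.toList ≥ thres
    · simp [h0, hge]
    · simp [h0, hge]

theorem firstMatch_eq_any (words : List String) (tok : String) (thres : Int) :
    firstMatch words tok thres = words.any (fun w => matchesB w tok thres) := by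
  induction words with
  | nil => simp [firstMatch]
  | cons w ws ih =>
      simp only [firstMatch, List.any_cons, cond_eq, ih]
      by_cases h : matchesB w tok thres = true <;> simp [h]

-- the common shape of both output loops
def goOut (P : String → Bool) : Int → List String → List (Int × Int)
  | _, [] => []
  | s, tok :: ts => (if P tok then [(s, s + 1)] else []) ++ goOut P (s + 1) ts

theorem aSide (P : String → Bool) :
    ∀ (toks : List String) (s : Nat),
      ((List.range toks.length).filter (fun i => P (toks.getD i ""))).map
          (fun (i : Nat) => (((s : Int) + (i : Int)), ((s : Int) + (i : Int)) + 1))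
        = goOut P (s : Int) toks := by
  intro toks
  induction toks with
  | nil => intro s; simp [goOut]
  | cons tok ts ih =>
      intro s
      have hcomp : ((fun i => P ((tok :: ts).getD i "")) ∘ Nat.succ) = (fun i => P (ts.getD i "")) := by
        funext i; simp
      have hfun : ((fun (i : Nat) => (((s : Int) + (i : Int)), ((s : Int) + (i : Int)) + 1)) ∘ Nat.succ)
          = (fun (i : Nat) => ((((s + 1 : Nat) : Int) + (i : Int)), (((s + 1 : Nat) : Int) + (i : Int)) + 1)) := by
        funext i
        simp only [Function.comp_apply, Prod.mk.injEq]
        push_cast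
        omega
      have key : (((List.range ts.length).map Nat.succ).filter (fun i => P ((tok :: ts).getD i ""))).map
            (fun (i : Nat) => (((s : Int) + (i : Int)), ((s : Int) + (i : Int)) + 1))
          = goOut P ((s : Int) + 1) ts := by
        rw [List.filter_map, hcomp, List.map_map, hfun, ih (s + 1)]
        push_cast
        rfl
      rw [List.length_cons, List.range_succ_eq_map, List.filter_cons, List.getD_cons_zero]
      by_cases h : P tok = true
      · rw [if_pos h, List.map_cons, key]
        simp [goOut, h]
      · rw [if_neg h, key]
        simp [goOut, h]

theorem bSide (P : String → Bool) :
    ∀ (toks : List String) (s : Int),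
      ((PySem.List.enumerate toks s).filter (fun p => P p.2)).map (fun p => (p.1, p.1 + 1))
        = goOut P s toks := by
  intro toks
  induction toks with
  | nil => intro s; simp [goOut, PySem.List.enumerate_nil]
  | cons tok ts ih =>
      intro s
      rw [PySem.List.enumerate_cons]
      by_cases h : P tok = true <;> simp [goOut, h, ih (s + 1)]

-- ===== VERDICT (by name: the statement is the Claim_ definition above) =====
theorem search_fuzzy_spec : Claim_equal_search_fuzzy := by
  intro words tokens thres _
  show search_fuzzy words tokens thres = search_fuzzy_alt words tokens thres
  rw [search_fuzzy, search_fuzzy_alt, PySem.List.foldl_append_if]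
  simp only [List.nil_append]
  have hfil : (List.range tokens.length).filter (fun i => firstMatch words (tokens.getD i "") thres)
      = (List.range tokens.length).filter
          (fun i => words.any (fun w => matchesB w (tokens.getD i "") thres)) := by
    apply List.filter_congr
    intro i _
    rw [firstMatch_eq_any]
  rw [hfil]
  have ha := aSide (fun tok => words.any (fun w => matchesB w tok thres)) tokens 0
  have hb := bSide (fun tok => words.any (fun w => matchesB w tok thres)) tokens ((0 : Nat) : Int)
  refine Eq.trans ?_ (ha.trans hb.symm)
  apply List.map_congr_left
  intro i _
  simp
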